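-- pv_equiv track=rewrite | github.com/alikins/ansible | lib/ansible/utils/module_metadata.py | seek_end_of_dict
-- ===== SOURCE A (Python) =====
-- class ParseError(Exception):
--     """Thrown when parsing a file fails"""
--     pass
--
-- def seek_end_of_dict(module_data, start_line, start_col, next_node_line, next_node_col):
--     """Look for the end of a dict in a set of lines
--
--     We know the starting position of the dict and we know the start of the
--     next code node but in between there may be multiple newlines and comments.
--     There may also be multiple python statements on the same line (separated
--     by semicolons)
--
--     Examples::
--         ANSIBLE_METADATA = {[..]}
--         DOCUMENTATION = [..]
--
--         ANSIBLE_METADATA = {[..]} # Optional comments with confusing junk => {}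
--         # Optional comments {}
--         DOCUMENTATION = [..]
--
--         ANSIBLE_METADATA = {
--             [..]
--             }
--         # Optional comments {}
--         DOCUMENTATION = [..]
--
--         ANSIBLE_METADATA = {[..]} ; DOCUMENTATION = [..]
--
--         ANSIBLE_METADATA = {}EOF
--     """
--     if next_node_line is None:
--         # The dict is the last statement in the file
--         snippet = module_data.splitlines()[start_line:]
--         next_node_col = 0
--         # Include the last line in the file
--         last_line_offset = 0
--     else:
--         # It's somewhere in the middle so we need to separate it from the rest
--         snippet = module_data.splitlines()[start_line:next_node_line]
--         # Do not include the last line because that's where the next node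
--         # starts
--         last_line_offset = 1
--
--     if next_node_col == 0:
--         # This handles all variants where there are only comments and blank
--         # lines between the dict and the next code node
--
--         # Step backwards through all the lines in the snippet
--         for line_idx, line in tuple(reversed(tuple(enumerate(snippet))))[last_line_offset:]:
--             end_col = None
--             # Step backwards through all the characters in the line
--             for col_idx, char in reversed(tuple(enumerate(c for c in line))):
--                 if char == '}' and end_col is None:
--                     # Potentially found the end of the dict
--                     end_col = col_idx
--
--                 elif char == '#' and end_col is not None:
--                     # The previous '}' was part of a comment.  Keep trying
--                     end_col = None
--
--             if end_col is not None:
--                 # Found the end!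
--                 end_line = start_line + line_idx
--                 break
--     else:
--         # Harder cases involving multiple statements on one line
--         # Good Ansible Module style doesn't do this so we're just going to
--         # treat this as an error for now:
--         raise ParseError('Multiple statements per line confuses the module metadata parser.')
--
--     return end_line, end_col
-- ===== SOURCE B (Python) =====
-- class ParseError(Exception):
--     """Thrown when parsing a file fails"""
--     pass
--
-- def seek_end_of_dict(module_data, start_line, start_col, next_node_line, next_node_col):
--     if next_node_line is None:
--         snippet = module_data.splitlines()[start_line:]
--         next_node_col = 0
--         last_line_offset = 0
--     else:
--         snippet = module_data.splitlines()[start_line:next_node_line]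
--         last_line_offset = 1
--
--     if next_node_col != 0:
--         raise ParseError('Multiple statements per line confuses the module metadata parser.')
--
--     # Walk the candidate lines from the end; within a line do ONE forward scan
--     # that stops at the first '#' and remembers the last '}' seen before it.
--     for line_idx in range(len(snippet) - last_line_offset - 1, -1, -1):
--         idx = None
--         for pos, ch in enumerate(snippet[line_idx]):
--             if ch == '#':
--                 break
--             if ch == '}':
--                 idx = pos
--         if idx is not None:
--             end_line = start_line + line_idx
--             end_col = idx
--             break
--
--     return end_line, end_col
-- ===== Notes on version B (the rewrite author's own statement) =====
-- stated objective: simpler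
-- what changed: A scans each line backwards over reversed(enumerate(line)) with a set-on-'}'/reset-on-'#' state machine and walks lines via a reversed enumerated tuple; B walks line indices down with range() and does one forward scan per line that stops at the first '#' and keeps the last '}' seen before it.
import Mathlib
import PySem

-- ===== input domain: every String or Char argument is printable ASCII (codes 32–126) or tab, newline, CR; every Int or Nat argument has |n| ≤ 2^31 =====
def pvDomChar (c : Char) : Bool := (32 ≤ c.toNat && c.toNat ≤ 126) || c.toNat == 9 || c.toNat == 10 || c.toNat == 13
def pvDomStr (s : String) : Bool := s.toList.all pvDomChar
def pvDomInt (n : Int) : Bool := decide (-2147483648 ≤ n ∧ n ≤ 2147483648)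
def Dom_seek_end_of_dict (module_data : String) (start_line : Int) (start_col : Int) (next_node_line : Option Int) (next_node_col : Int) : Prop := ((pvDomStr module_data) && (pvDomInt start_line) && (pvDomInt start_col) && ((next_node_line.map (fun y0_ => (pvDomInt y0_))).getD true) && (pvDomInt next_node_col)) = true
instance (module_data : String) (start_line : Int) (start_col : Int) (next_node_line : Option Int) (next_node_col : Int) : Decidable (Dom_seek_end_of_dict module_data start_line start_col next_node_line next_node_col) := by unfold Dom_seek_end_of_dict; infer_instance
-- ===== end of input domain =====

-- B replaces A's reversed-enumerate char state machine (set on '}', reset on '#') by a single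
-- forward scan per line that stops at the first '#' and keeps the last '}' seen (objective: simpler).
-- Where Python A raises (ParseError on next_node_col ≠ 0, UnboundLocalError when no line matches),
-- B raises identically; those inputs are excluded by Pre_ and both ports return a junk (0, 0) there.

-- ===== PORT A =====
-- inner loop: for col_idx, char in reversed(tuple(enumerate(c for c in line))): …
def pvA_step (end_col : Option Int) (p : Int × Char) : Option Int :=
  if p.2 = '}' ∧ end_col = none then some p.1
  else if p.2 = '#' ∧ end_col ≠ none then none
  else end_col

def pvA_inner (cs : List Char) : Option Int :=
  ((PySem.List.enumerate cs 0).reverse).foldl pvA_step none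

-- outer loop with break; none = fell off the loop (Python would hit UnboundLocalError at return)
def pvA_lines (start_line : Int) : List (Int × String) → Option (Int × Int)
  | [] => none
  | p :: rest =>
    match pvA_inner p.2.toList with
    | some c => some (start_line + p.1, c)
    | none => pvA_lines start_line rest

def seek_end_of_dict (module_data : String) (start_line : Int) (start_col : Int) (next_node_line : Option Int) (next_node_col : Int) : Int × Int :=
  let lines := PySem.Str.splitlines module_data
  match next_node_line with
  | none =>
      let snippet := PySem.List.slice lines (some start_line) none
      -- next_node_col := 0, last_line_offset := 0, so the `next_node_col == 0` branch is taken
      (pvA_lines start_line ((PySem.List.enumerate snippet 0).reverse)).getD (0, 0)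
  | some nl =>
      let snippet := PySem.List.slice lines (some start_line) (some nl)
      if next_node_col ≠ 0 then (0, 0)   -- Python raises ParseError; excluded by Pre_
      else (pvA_lines start_line (((PySem.List.enumerate snippet 0).reverse).drop 1)).getD (0, 0)

-- ===== PORT B =====
-- inner loop: forward scan, break at '#', remember last '}' position
def pvB_scan (i : Int) (idx : Option Int) : List Char → Option Int
  | [] => idx
  | c :: cs => if c = '#' then idx else pvB_scan (i + 1) (if c = '}' then some i else idx) cs

-- for line_idx in range(n - 1, -1, -1): … (fuel = line_idx + 1)
def pvB_lines (start_line : Int) (snippet : List String) : Nat → Option (Int × Int)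
  | 0 => none
  | k + 1 =>
    match pvB_scan 0 none (snippet.getD k "").toList with
    | some idx => some (start_line + (k : Int), idx)
    | none => pvB_lines start_line snippet k

def seek_end_of_dict_alt (module_data : String) (start_line : Int) (start_col : Int) (next_node_line : Option Int) (next_node_col : Int) : Int × Int :=
  let lines := PySem.Str.splitlines module_data
  match next_node_line with
  | none =>
      let snippet := PySem.List.slice lines (some start_line) none
      (pvB_lines start_line snippet snippet.length).getD (0, 0)
  | some nl =>
      let snippet := PySem.List.slice lines (some start_line) (some nl)
      if next_node_col ≠ 0 then (0, 0)   -- Python raises ParseError; excluded by Pre_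
      else (pvB_lines start_line snippet (snippet.length - 1)).getD (0, 0)

-- ===== PRECONDITION & SPEC =====
-- Pre_ excludes exactly the inputs where Python A raises: ParseError when next_node_line is given
-- and next_node_col ≠ 0, and UnboundLocalError when no candidate line holds a '}' before a '#'.
def Pre_seek_end_of_dict (module_data : String) (start_line : Int) (start_col : Int) (next_node_line : Option Int) (next_node_col : Int) : Prop :=
  (next_node_line = none ∨ next_node_col = 0) ∧
  (∃ line ∈ ((match next_node_line with
             | none => PySem.List.slice (PySem.Str.splitlines module_data) (some start_line) none
             | some nl => (PySem.List.slice (PySem.Str.splitlines module_data) (some start_line) (some nl)).dropLast : List String)),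
     '}' ∈ line.toList.takeWhile (· ≠ '#'))
instance (module_data : String) (start_line : Int) (start_col : Int) (next_node_line : Option Int) (next_node_col : Int) : Decidable (Pre_seek_end_of_dict module_data start_line start_col next_node_line next_node_col) := by unfold Pre_seek_end_of_dict; infer_instance

def pvWitness_seek_end_of_dict : String × Int × Int × Option Int × Int := ("META = {}\n", 0, 0, none, 0)

def Spec_seek_end_of_dict (module_data : String) (start_line : Int) (start_col : Int) (next_node_line : Option Int) (next_node_col : Int) (out : Int × Int) : Prop := out = seek_end_of_dict_alt module_data start_line start_col next_node_line next_node_col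
instance (module_data : String) (start_line : Int) (start_col : Int) (next_node_line : Option Int) (next_node_col : Int) (out : Int × Int) : Decidable (Spec_seek_end_of_dict module_data start_line start_col next_node_line next_node_col out) := by unfold Spec_seek_end_of_dict; infer_instance

-- ===== CLAIM (what is proved, stated in full; the proofs are below) =====
def Claim_equal_seek_end_of_dict : Prop := ∀ (module_data : String) (start_line : Int) (start_col : Int) (next_node_line : Option Int) (next_node_col : Int), Dom_seek_end_of_dict module_data start_line start_col next_node_line next_node_col → Pre_seek_end_of_dict module_data start_line start_col next_node_line next_node_col → Spec_seek_end_of_dict module_data start_line start_col next_node_line next_node_col (seek_end_of_dict module_data start_line start_col next_node_line next_node_col)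

-- ===== LEMMAS AND PROOFS =====

-- B's scan only ever strengthens its accumulator
theorem pvB_scan_or (cs : List Char) (i : Int) (acc : Option Int) :
    pvB_scan i acc cs = (pvB_scan i none cs).or acc := by
  induction cs generalizing i acc with
  | nil => simp [pvB_scan]
  | cons c cs ih =>
    by_cases hc : c = '#'
    · simp [pvB_scan, hc]
    · by_cases hb : c = '}'
      · simp only [pvB_scan, if_neg hc, if_pos hb]
        rw [ih (i + 1) (some i)]
        cases pvB_scan (i + 1) none cs <;> simp
      · simp only [pvB_scan, if_neg hc, if_neg hb]
        rw [ih (i + 1) acc]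

-- A's backward state machine over a line equals B's forward scan
theorem pvA_fold_eq (cs : List Char) (b : Int) (s : Option Int) :
    ((PySem.List.enumerate cs b).reverse).foldl pvA_step s
      = if s.isSome ∧ '#' ∉ cs then s else pvB_scan b none cs := by
  induction cs generalizing b s with
  | nil => cases s <;> simp [pvB_scan]
  | cons c cs ih =>
    rw [PySem.List.enumerate_cons, List.reverse_cons, List.foldl_append, ih (b + 1) s]
    simp only [List.foldl_cons, List.foldl_nil]
    by_cases hc : c = '#'
    · subst hc
      have hB : pvB_scan b none ('#' :: cs) = none := by simp [pvB_scan]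
      have hP : ¬((s.isSome = true) ∧ '#' ∉ ('#' :: cs)) := fun h => h.2 List.mem_cons_self
      rw [hB, if_neg hP]
      by_cases hs : s.isSome = true ∧ '#' ∉ cs
      · rw [if_pos hs]
        obtain ⟨v, rfl⟩ := Option.isSome_iff_exists.mp hs.1
        simp [pvA_step]
      · rw [if_neg hs]
        cases h : pvB_scan (b + 1) none cs with
        | none => simp [pvA_step]
        | some v => simp [pvA_step]
    · have hmem : ('#' ∈ (c :: cs)) → '#' ∈ cs :=
        fun h => (List.mem_cons.mp h).resolve_left (fun he => hc he.symm)
      have hmem' : ('#' ∈ cs) → '#' ∈ (c :: cs) := fun h => List.mem_cons_of_mem _ h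
      by_cases hb2 : c = '}'
      · subst hb2
        have hB : pvB_scan b none ('}' :: cs) = (pvB_scan (b + 1) none cs).or (some b) := by
          rw [show pvB_scan b none ('}' :: cs) = pvB_scan (b + 1) (some b) cs from by
            simp [pvB_scan], pvB_scan_or]
        rw [hB]
        by_cases hs : s.isSome = true ∧ '#' ∉ cs
        · have h1 : s.isSome = true ∧ '#' ∉ ('}' :: cs) := ⟨hs.1, fun h => hs.2 (hmem h)⟩
          rw [if_pos hs, if_pos h1]
          obtain ⟨v, rfl⟩ := Option.isSome_iff_exists.mp hs.1
          simp [pvA_step]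
        · have h1 : ¬(s.isSome = true ∧ '#' ∉ ('}' :: cs)) :=
            fun h => hs ⟨h.1, fun hm => h.2 (hmem' hm)⟩
          rw [if_neg hs, if_neg h1]
          cases h : pvB_scan (b + 1) none cs with
          | none => simp [pvA_step]
          | some v => simp [pvA_step]
      · have hB : pvB_scan b none (c :: cs) = pvB_scan (b + 1) none cs := by
          simp [pvB_scan, hc, hb2]
        have hstep : ∀ t, pvA_step t (b, c) = t := fun t => by simp [pvA_step, hc, hb2]
        rw [hB]
        by_cases hs : s.isSome = true ∧ '#' ∉ cs
        · have h1 : s.isSome = true ∧ '#' ∉ (c :: cs) := ⟨hs.1, fun h => hs.2 (hmem h)⟩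
          rw [if_pos hs, if_pos h1, hstep]
        · have h1 : ¬(s.isSome = true ∧ '#' ∉ (c :: cs)) :=
            fun h => hs ⟨h.1, fun hm => h.2 (hmem' hm)⟩
          rw [if_neg hs, if_neg h1, hstep]

-- the two outer loops agree: B's countdown over indices is A's walk down the reversed enumeration
theorem outer_eq (snippet : List String) (start_line : Int) (k : Nat) (hk : k ≤ snippet.length) :
    pvA_lines start_line (((PySem.List.enumerate snippet 0).reverse).drop (snippet.length - k))
      = pvB_lines start_line snippet k := by
  induction k with
  | zero =>
    rw [Nat.sub_zero, List.drop_of_length_le (by simp)]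
    rfl
  | succ k ih =>
    have hlt : snippet.length - (k + 1) < ((PySem.List.enumerate snippet 0).reverse).length := by
      simp; omega
    have hkl : k < snippet.length := by omega
    have hk1 : snippet.length - (k + 1) + 1 = snippet.length - k := by omega
    have hget : ((PySem.List.enumerate snippet 0).reverse)[snippet.length - (k + 1)]'hlt
        = ((k : Int), snippet[k]) := by
      rw [List.getElem_eq_iff hlt,
        List.getElem?_reverse (by simp; omega : snippet.length - (k + 1) < (PySem.List.enumerate snippet 0).length)]
      rw [show (PySem.List.enumerate snippet 0).length - 1 - (snippet.length - (k + 1)) = k from by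
        simp; omega]
      rw [PySem.List.getElem?_enumerate, List.getElem?_eq_getElem hkl]
      simp
    rw [List.drop_eq_getElem_cons hlt, hget, hk1]
    have hA : pvA_inner (snippet[k]).toList = pvB_scan 0 none (snippet[k]).toList := by
      rw [pvA_inner, pvA_fold_eq]
      simp
    simp only [pvA_lines, pvB_lines, List.getD_eq_getElem snippet "" hkl, hA]
    cases h : pvB_scan 0 none (snippet[k]).toList with
    | none => simp [ih (by omega)]
    | some v => simp

theorem ports_eq (module_data : String) (start_line : Int) (start_col : Int) (next_node_line : Option Int) (next_node_col : Int) :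
    seek_end_of_dict module_data start_line start_col next_node_line next_node_col
      = seek_end_of_dict_alt module_data start_line start_col next_node_line next_node_col := by
  unfold seek_end_of_dict seek_end_of_dict_alt
  cases next_node_line with
  | none =>
    have h := outer_eq (PySem.List.slice (PySem.Str.splitlines module_data) (some start_line) none)
      start_line _ (le_refl _)
    rw [Nat.sub_self, List.drop_zero] at h
    simp only [h]
  | some nl =>
    by_cases hnc : next_node_col ≠ 0
    · simp [hnc]
    · simp only [if_neg hnc]
      cases hlen : (PySem.List.slice (PySem.Str.splitlines module_data) (some start_line) (some nl)).length with
      | zero =>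
        rw [List.eq_nil_of_length_eq_zero hlen]
        rfl
      | succ m =>
        have h := outer_eq (PySem.List.slice (PySem.Str.splitlines module_data) (some start_line) (some nl))
          start_line m (by omega)
        rw [show (PySem.List.slice (PySem.Str.splitlines module_data) (some start_line) (some nl)).length - m = 1 from by omega] at h
        simp only [Nat.add_sub_cancel, h]

-- ===== VERDICT (by name: the statement is the Claim_ definition above) =====
theorem seek_end_of_dict_spec : Claim_equal_seek_end_of_dict := by
  intro md sl sc nl nc _ _
  unfold Spec_seek_end_of_dict
  exact ports_eq md sl sc nl nc
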